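-- pv_equiv track=rewrite | github.com/datacommonsorg/data | tools/statvar_importer/schema/schema_checker.py | is_url_allowed
-- ===== SOURCE A (Python) =====
-- _URL_SEPERATORS = '/?&#,'
--
-- def is_url_allowed(url: str, urls_allowlist: set[str]) -> bool:
--     """Returns True if URL is in the allowlist
--
--     Args:
--       url: URL to be checked.
--         Also check all the URL prefixes broken seperators like '/#&'
--       urls_allowlist: set of URLs allowed.
--     """
--     if url in urls_allowlist:
--         # URL directly present in allowlist.
--         return True
--
--     # Check if URL prefix is in allowlist.
--     url_prefix = url
--     while url_prefix:
--         # Get the url prefix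
--         pos = -1
--         for c in _URL_SEPERATORS:
--             pos = url_prefix.rfind(c)
--             if pos > 0:
--                 break
--         if pos > 0 and pos < len(url_prefix):
--             url_prefix = url_prefix[:pos]
--             if url_prefix in urls_allowlist:
--                 return True
--         else:
--             break
--     return False
-- ===== SOURCE B (Python) =====
-- _URL_SEPERATORS = '/?&#,'
--
--
-- def is_url_allowed(url: str, urls_allowlist: set) -> bool:
--     """Returns True if URL or one of its separator-truncated prefixes is allowlisted.
--
--     Instead of re-scanning the shrinking prefix with rfind for every separator at
--     every step (as the original does), collect the candidate cut positions of each
--     separator in one pass and walk them from the right; once a separator's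
--     positions are exhausted, lower the bound to its leftmost cut and move on to
--     the next separator in priority order.
--     """
--     if url in urls_allowlist:
--         return True
--     bound = len(url)
--     for c in _URL_SEPERATORS:
--         cuts = [i for i, ch in enumerate(url[:bound]) if ch == c and i > 0]
--         for p in reversed(cuts):
--             if url[:p] in urls_allowlist:
--                 return True
--         if cuts:
--             bound = cuts[0]
--     return False
-- ===== Notes on version B (the rewrite author's own statement) =====
-- stated objective: alternative
-- what changed: Instead of re-scanning the shrinking prefix with rfind for every separator at every truncation step, B collects each separator's cut positions in one pass over the current bound and walks them right-to-left, dropping the bound to a separator's leftmost cut before moving to the next separator in priority order.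
import Mathlib
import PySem

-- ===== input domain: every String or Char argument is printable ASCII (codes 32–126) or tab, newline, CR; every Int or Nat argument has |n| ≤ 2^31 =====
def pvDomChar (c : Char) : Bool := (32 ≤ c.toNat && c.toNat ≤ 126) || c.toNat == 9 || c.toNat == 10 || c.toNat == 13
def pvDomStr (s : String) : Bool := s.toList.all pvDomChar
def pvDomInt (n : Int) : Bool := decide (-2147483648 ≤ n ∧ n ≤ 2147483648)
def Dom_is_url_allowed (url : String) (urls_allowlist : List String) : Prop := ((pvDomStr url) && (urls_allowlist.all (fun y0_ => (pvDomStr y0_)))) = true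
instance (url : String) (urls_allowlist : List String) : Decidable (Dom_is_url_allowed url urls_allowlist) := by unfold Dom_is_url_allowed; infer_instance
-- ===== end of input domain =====

-- B replaces A's per-step rfind re-scans of the shrinking prefix by one pass per separator
-- collecting its cut positions, walked right-to-left under a shrinking bound (alternative
-- algorithm, same asymptotic cost).

-- ===== PORT A =====

-- _URL_SEPERATORS = '/?&#,'
def pvSeps : List Char := ['/', '?', '&', '#', ',']

-- 'pos = -1; for c in _URL_SEPERATORS: pos = url_prefix.rfind(c); if pos > 0: break'
-- (pos keeps the last rfind result when no separator gave pos > 0)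
def pvSepPos (p : List Char) : List Char → Int
  | [] => -1
  | c :: r =>
    let pos := PySem.Chars.rfind p [c]
    if 0 < pos then pos
    else match r with
      | [] => pos
      | _ :: _ => pvSepPos p r

-- the 'while url_prefix:' loop of A
def pvALoop (allow : List String) (p : List Char) : Bool :=
  if p.isEmpty then false
  else
    let pos := pvSepPos p pvSeps
    if h : 0 < pos ∧ pos < (p.length : Int) then
      let p' := PySem.List.slice p none (some pos)
      if String.mk p' ∈ allow then true else pvALoop allow p'
    else false
termination_by p.length
decreasing_by
  rw [PySem.List.slice_to p h.1.le]
  simp only [List.length_take]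
  omega

def is_url_allowed (url : String) (urls_allowlist : List String) : Bool :=
  if url ∈ urls_allowlist then true
  else pvALoop urls_allowlist url.toList

-- ===== PORT B =====

-- 'for p in reversed(cuts): if url[:p] in urls_allowlist: return True'
def pvTryCuts (allow : List String) (l : List Char) : List Int → Bool
  | [] => false
  | p :: rest =>
    if String.mk (PySem.List.slice l none (some p)) ∈ allow then true
    else pvTryCuts allow l rest

-- 'for c in _URL_SEPERATORS: …' with the shrinking bound
def pvBPhase (allow : List String) (l : List Char) : List Char → Int → Bool
  | [], _ => false
  | c :: r, bound =>
    let cuts := ((PySem.List.enumerate (PySem.List.slice l none (some bound)) 0).filter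
        (fun x => x.2 == c && decide (0 < x.1))).map Prod.fst
    if pvTryCuts allow l cuts.reverse then true
    else match cuts with
      | [] => pvBPhase allow l r bound
      | q :: _ => pvBPhase allow l r q

def is_url_allowed_alt (url : String) (urls_allowlist : List String) : Bool :=
  if url ∈ urls_allowlist then true
  else pvBPhase urls_allowlist url.toList pvSeps (url.toList.length : Int)

-- ===== PRECONDITION & SPEC =====
def Spec_is_url_allowed (url : String) (urls_allowlist : List String) (out : Bool) : Prop := out = is_url_allowed_alt url urls_allowlist
instance (url : String) (urls_allowlist : List String) (out : Bool) : Decidable (Spec_is_url_allowed url urls_allowlist out) := by unfold Spec_is_url_allowed; infer_instance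

-- ===== CLAIM (what is proved, stated in full; the proofs are below) =====
def Claim_equal_is_url_allowed : Prop := ∀ (url : String) (urls_allowlist : List String), Dom_is_url_allowed url urls_allowlist → Spec_is_url_allowed url urls_allowlist (is_url_allowed url urls_allowlist)

-- ===== LEMMAS AND PROOFS =====

-- positions j < n with l[j] = c (ascending)
def pvOcc (l : List Char) (c : Char) (n : Nat) : List Nat :=
  (List.range n).filter (fun j => decide (l[j]? = some c))

-- the cut candidates: positions 0 < j < n with l[j] = c (ascending)
def pvCuts (l : List Char) (c : Char) (n : Nat) : List Nat :=
  (pvOcc l c n).filter (fun j => decide (0 < j))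

-- the separator position A's inner for-loop selects, abstractly
def pvPick (l : List Char) (n : Nat) : List Char → Option Nat
  | [] => none
  | c :: r =>
    match (pvCuts l c n).getLast? with
    | some m => some m
    | none => pvPick l n r

theorem pvMem_cuts {l : List Char} {c : Char} {n j : Nat} :
    j ∈ pvCuts l c n ↔ 0 < j ∧ j < n ∧ l[j]? = some c := by
  simp [pvCuts, pvOcc, List.mem_filter]
  tauto

theorem pvPick_lt {l : List Char} {n m : Nat} {s : List Char}
    (h : pvPick l n s = some m) : m < n := by
  induction s with
  | nil => simp [pvPick] at h
  | cons c r ih =>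
    simp only [pvPick] at h
    cases hg : (pvCuts l c n).getLast? with
    | none => rw [hg] at h; exact ih h
    | some m' =>
      rw [hg] at h
      cases h
      exact (pvMem_cuts.1 (List.mem_of_getLast? hg)).2.1

theorem pvPick_pos {l : List Char} {n m : Nat} {s : List Char}
    (h : pvPick l n s = some m) : 0 < m := by
  induction s with
  | nil => simp [pvPick] at h
  | cons c r ih =>
    simp only [pvPick] at h
    cases hg : (pvCuts l c n).getLast? with
    | none => rw [hg] at h; exact ih h
    | some m' =>
      rw [hg] at h
      cases h
      exact (pvMem_cuts.1 (List.mem_of_getLast? hg)).1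

theorem pvCuts_nil_of_take_nil {l : List Char} {c : Char} {n : Nat}
    (h : l.take n = []) : pvCuts l c n = [] := by
  rcases List.take_eq_nil_iff.mp h with h0 | h0
  · simp [pvCuts, pvOcc, h0]
  · have : ∀ j : Nat, l[j]? = none := by intro j; simp [h0]
    simp [pvCuts, pvOcc, this]

theorem pvPick_append_of_nil {l : List Char} {n : Nat} {e s : List Char}
    (he : ∀ c ∈ e, pvCuts l c n = []) : pvPick l n (e ++ s) = pvPick l n s := by
  induction e with
  | nil => rfl
  | cons c e ih =>
    simp only [List.cons_append, pvPick]
    rw [(List.getLast?_eq_none_iff).2 (he c (by simp))]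
    exact ih (fun c' hc' => he c' (by simp [hc']))

theorem pvPick_none_of_all_nil {l : List Char} {n : Nat} {s : List Char}
    (h : ∀ c ∈ s, pvCuts l c n = []) : pvPick l n s = none := by
  have := pvPick_append_of_nil (l := l) (n := n) (s := ([] : List Char)) h
  rw [List.append_nil] at this
  rw [this]
  rfl

-- the common reference chain: truncate at the picked position, test, repeat
def pvChain (allow : List String) (l : List Char) (n : Nat) : Bool :=
  match h : pvPick l n pvSeps with
  | none => false
  | some m =>
    if String.mk (l.take m) ∈ allow then true else pvChain allow l m
termination_by n
decreasing_by exact pvPick_lt h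

-- [c].isPrefixOf t tests the first character
theorem pvIsPrefixOf_singleton (c : Char) (t : List Char) :
    [c].isPrefixOf t = decide (t[0]? = some c) := by
  cases t <;> simp [List.isPrefixOf, eq_comm, Bool.beq_eq_decide_eq]

-- single-character rfind returns the last occurrence position (or -1)
theorem pvRfind_go_spec (l : List Char) (c : Char) (n : Nat) :
    PySem.Chars.rfind.go l [c] n =
      match (pvOcc l c (n + 1)).getLast? with
      | some m => (m : Int)
      | none => -1 := by
  induction n with
  | zero =>
    simp only [PySem.Chars.rfind.go, pvIsPrefixOf_singleton, pvOcc, List.range_one,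
      List.filter_singleton]
    by_cases h : l[0]? = some c <;> simp [h]
  | succ n ih =>
    have hstep : PySem.Chars.rfind.go l [c] (n + 1) =
        if [c].isPrefixOf (l.drop (n + 1)) then ((n + 1 : Nat) : Int)
        else PySem.Chars.rfind.go l [c] n := by
      simp [PySem.Chars.rfind.go]
    rw [hstep, pvIsPrefixOf_singleton]
    have hocc : pvOcc l c (n + 1 + 1) =
        pvOcc l c (n + 1) ++ if l[n + 1]? = some c then [n + 1] else [] := by
      simp only [pvOcc, List.range_succ, List.filter_append, List.filter_singleton]
      split_ifs with h <;> simp [h]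
    have hd : (l.drop (n + 1))[0]? = l[n + 1]? := by
      simp [List.getElem?_drop]
    rw [hd, hocc]
    by_cases h : l[n + 1]? = some c
    · simp [h]
    · simp [h, ih]

theorem pvRfind_spec (l : List Char) (c : Char) :
    PySem.Chars.rfind l [c] =
      match (pvOcc l c l.length).getLast? with
      | some m => (m : Int)
      | none => -1 := by
  have : PySem.Chars.rfind l [c] = PySem.Chars.rfind.go l [c] l.length := rfl
  rw [this, pvRfind_go_spec]
  have hocc : pvOcc l c (l.length + 1) = pvOcc l c l.length := by
    simp only [pvOcc, List.range_succ, List.filter_append, List.filter_singleton]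
    simp [List.getElem?_eq_none (le_refl l.length)]
  rw [hocc]

theorem pvOcc_take {l : List Char} {c : Char} {n : Nat} (hn : n ≤ l.length) :
    pvOcc (l.take n) c (l.take n).length = pvOcc l c n := by
  have hlen : (l.take n).length = n := by simp [hn]
  rw [hlen]
  unfold pvOcc
  refine List.filter_congr (fun j hj => ?_)
  rw [List.mem_range] at hj
  congr 1
  rw [List.getElem?_take_of_lt hj]

theorem pvOcc_pairwise (l : List Char) (c : Char) (n : Nat) :
    (pvOcc l c n).Pairwise (· < ·) := by
  exact (List.pairwise_lt_range).filter _

theorem pvCuts_pairwise (l : List Char) (c : Char) (n : Nat) :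
    (pvCuts l c n).Pairwise (· < ·) := by
  exact (pvOcc_pairwise l c n).filter _

theorem pvCuts_last_of_occ_pos {l : List Char} {c : Char} {n m : Nat}
    (h : (pvOcc l c n).getLast? = some m) (hm : 0 < m) :
    (pvCuts l c n).getLast? = some m := by
  have hne : pvOcc l c n ≠ [] := by
    intro h0; rw [h0] at h; simp at h
  obtain ⟨o, ho⟩ : ∃ o, pvOcc l c n = o ++ [m] := by
    refine ⟨(pvOcc l c n).dropLast, ?_⟩
    have := List.dropLast_append_getLast hne
    rw [List.getLast?_eq_getLast hne] at h
    rw [← this]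
    simp [Option.some_inj.mp h]
  unfold pvCuts
  rw [ho, List.filter_append, List.filter_singleton]
  simp [hm]

theorem pvCuts_nil_of_occ_zero {l : List Char} {c : Char} {n : Nat}
    (h : (pvOcc l c n).getLast? = some 0) : pvCuts l c n = [] := by
  have hne : pvOcc l c n ≠ [] := by
    intro h0; rw [h0] at h; simp at h
  have hdecomp := List.dropLast_append_getLast hne
  rw [List.getLast?_eq_getLast hne] at h
  have hlast : (pvOcc l c n).getLast hne = 0 := Option.some_inj.mp h
  have hpw := pvOcc_pairwise l c n
  rw [← hdecomp, hlast] at hpw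
  rw [List.pairwise_append] at hpw
  have hd : (pvOcc l c n).dropLast = [] := by
    cases hdl : (pvOcc l c n).dropLast with
    | nil => rfl
    | cons a t =>
      exfalso
      have := hpw.2.2 a (by rw [hdl]; simp) 0 (by simp)
      omega
  have hocc : pvOcc l c n = [0] := by
    rw [← hdecomp, hd, hlast]
    rfl
  simp [pvCuts, hocc]

theorem pvCuts_nil_of_occ_nil {l : List Char} {c : Char} {n : Nat}
    (h : (pvOcc l c n).getLast? = none) : pvCuts l c n = [] := by
  simp only [List.getLast?_eq_none_iff] at h
  simp [pvCuts, h]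

-- pvCuts as a single filtered range
theorem pvCuts_eq_filter (l : List Char) (c : Char) (n : Nat) :
    pvCuts l c n =
      (List.range n).filter (fun j => decide (l[j]? = some c) && decide (0 < j)) := by
  simp only [pvCuts, pvOcc, List.filter_filter]
  exact List.filter_congr (fun j _ => by simp [Bool.and_comm])

theorem pvCuts_append {l : List Char} {c : Char} {m n : Nat} (h : m ≤ n) :
    ∃ rest, pvCuts l c n = pvCuts l c m ++ rest ∧ ∀ j ∈ rest, m ≤ j := by
  refine ⟨((List.range (n - m)).map (m + ·)).filter
      (fun j => decide (l[j]? = some c) && decide (0 < j)), ?_, ?_⟩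
  · rw [pvCuts_eq_filter, pvCuts_eq_filter, ← List.filter_append, ← List.range_add,
      Nat.add_sub_cancel' h]
  · intro j hj
    rw [List.mem_filter] at hj
    obtain ⟨k, -, hk⟩ := List.mem_map.mp hj.1
    omega

theorem pvCuts_nodup (l : List Char) (c : Char) (n : Nat) :
    (pvCuts l c n).Nodup := by
  rw [pvCuts_eq_filter]; exact (List.nodup_range).filter _

theorem pvCuts_le_last {l : List Char} {c : Char} {n m : Nat}
    (h : (pvCuts l c n).getLast? = some m) : ∀ j ∈ pvCuts l c n, j ≤ m := by
  have hne : pvCuts l c n ≠ [] := by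
    intro h0; rw [h0] at h; simp at h
  have hdecomp := List.dropLast_append_getLast hne
  rw [List.getLast?_eq_getLast hne] at h
  have hpw := pvCuts_pairwise l c n
  rw [← hdecomp, Option.some_inj.mp h] at hpw
  intro j hj
  rw [← hdecomp, Option.some_inj.mp h] at hj
  rw [List.pairwise_append] at hpw
  rcases List.mem_append.mp hj with hj | hj
  · exact le_of_lt (hpw.2.2 j hj m (by simp))
  · simp at hj; omega

theorem pvCuts_dropLast {l : List Char} {c : Char} {n m : Nat}
    (h : (pvCuts l c n).getLast? = some m) :
    pvCuts l c m = (pvCuts l c n).dropLast := by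
  have hmem : m ∈ pvCuts l c n := List.mem_of_getLast? h
  have hmn : m < n := (pvMem_cuts.mp hmem).2.1
  obtain ⟨rest, heq, hge⟩ := pvCuts_append (l := l) (c := c) hmn.le
  have hle := pvCuts_le_last h
  have hrest_eq : ∀ j ∈ rest, j = m := by
    intro j hj
    have h1 := hge j hj
    have h2 := hle j (by rw [heq]; exact List.mem_append_right _ hj)
    omega
  have hnotm : m ∉ pvCuts l c m := by
    intro hm; exact absurd (pvMem_cuts.mp hm).2.1 (lt_irrefl m)
  have hmrest : m ∈ rest := by
    rcases List.mem_append.mp (heq ▸ hmem) with h' | h'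
    · exact absurd h' hnotm
    · exact h'
  have hnodup : (pvCuts l c n).Nodup := pvCuts_nodup l c n
  rw [heq] at hnodup
  have hrestnodup := hnodup.of_append_right
  have hrest : rest = [m] := by
    cases rest with
    | nil => simp at hmrest
    | cons a t =>
      have ha := hrest_eq a (by simp)
      cases t with
      | nil => rw [ha]
      | cons b u =>
        exfalso
        have hb := hrest_eq b (by simp)
        have := List.Nodup.notMem (l := b :: u) (a := a) hrestnodup
        rw [ha, hb] at this
        simp at this
  rw [heq, hrest, List.dropLast_concat]

theorem pvCuts_mono_nil {l : List Char} {c : Char} {m n : Nat}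
    (h : pvCuts l c n = []) (hmn : m ≤ n) : pvCuts l c m = [] := by
  obtain ⟨rest, heq, -⟩ := pvCuts_append (l := l) (c := c) hmn
  rw [h] at heq
  exact (List.append_eq_nil_iff.mp heq.symm).1

-- A's separator loop returns the picked position (and a nonpositive value when none is picked)
theorem pvSepPos_pick (l : List Char) (n : Nat) (hn : n ≤ l.length) (s : List Char) (hs : s ≠ []) :
    (∀ m, pvPick l n s = some m → pvSepPos (l.take n) s = (m : Int)) ∧
      (pvPick l n s = none → pvSepPos (l.take n) s ≤ 0) := by
  induction s with
  | nil => exact absurd rfl hs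
  | cons c r ih =>
    have hr := pvRfind_spec (l.take n) c
    rw [pvOcc_take hn] at hr
    simp only [pvSepPos, pvPick]
    cases hg : (pvOcc l c n).getLast? with
    | some m =>
      by_cases hm : 0 < m
      · rw [pvCuts_last_of_occ_pos hg hm]
        rw [hg] at hr
        simp only [hr]
        constructor
        · intro m' hm'
          cases hm'
          simp [hm]
        · intro hnone; cases hnone
      · have hm0 : m = 0 := by omega
        subst hm0
        rw [pvCuts_nil_of_occ_zero hg]
        rw [hg] at hr
        simp only [hr, List.getLast?_nil]
        cases r with
        | nil =>
          constructor
          · intro m' hm'; simp [pvPick] at hm'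
          · intro _; simp
        | cons c' r' =>
          simpa using ih (by simp)
    | none =>
      rw [pvCuts_nil_of_occ_nil hg]
      rw [hg] at hr
      simp only [hr, List.getLast?_nil]
      cases r with
      | nil =>
        constructor
        · intro m' hm'; simp [pvPick] at hm'
        · intro _; norm_num
      | cons c' r' =>
        have h1 : ¬ (0 : Int) < -1 := by norm_num
        simpa [h1] using ih (by simp)

-- B's cut-collection comprehension computes pvCuts
theorem pvEnumCuts {l : List Char} (c : Char) {n : Nat} (hn : n ≤ l.length) :
    (((PySem.List.enumerate (PySem.List.slice l none (some (n : Int))) 0).filter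
        (fun x => x.2 == c && decide (0 < x.1))).map Prod.fst) =
      (pvCuts l c n).map (Nat.cast) := by
  rw [PySem.List.slice_to_natCast l n]
  rw [PySem.List.enumerate_eq_map_pyRange (l.take n) c]
  have hlen : PySem.List.len (l.take n) = (n : Int) := by
    simp [PySem.List.len, hn]
  rw [hlen, PySem.List.pyRange_zero_natCast]
  simp only [List.filter_map, List.map_map, Function.comp_def]
  rw [pvCuts_eq_filter]
  have hcong : ∀ k ∈ List.range n,
      (PySem.List.pyGetD (l.take n) ((k : Nat) : Int) c == c && decide ((0 : Int) < ((k : Nat) : Int))) =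
      (decide (l[k]? = some c) && decide (0 < k)) := by
    intro k hk
    rw [List.mem_range] at hk
    have h1 : PySem.List.pyGetD (l.take n) ((k : Nat) : Int) c = l[k]'(by omega) := by
      rw [PySem.List.pyGetD_natCast]
      rw [List.getD_eq_getElem?_getD, List.getElem?_take_of_lt hk,
        List.getElem?_eq_getElem (by omega)]
      rfl
    rw [h1, List.getElem?_eq_getElem (by omega)]
    simp [Bool.beq_eq_decide_eq]
  rw [List.filter_congr hcong]

theorem pvTryCuts_any (allow : List String) (l : List Char) (js : List Nat) :
    pvTryCuts allow l (js.map Nat.cast) =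
      js.any (fun j => decide (String.mk (l.take j) ∈ allow)) := by
  induction js with
  | nil => simp [pvTryCuts]
  | cons j rest ih =>
    simp only [List.map_cons, pvTryCuts, List.any_cons, ← ih]
    rw [PySem.List.slice_to l (by positivity)]
    rw [Int.toNat_natCast]
    by_cases hm : String.mk (List.take j l) ∈ allow <;> simp [hm]

theorem pvA_eq_chain (allow : List String) (l : List Char) :
    ∀ n, n ≤ l.length → pvALoop allow (l.take n) = pvChain allow l n := by
  intro n
  induction n using Nat.strong_induction_on with
  | _ n ih =>
    intro hn
    rw [pvALoop, pvChain]
    by_cases hp : (l.take n).isEmpty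
    · have hnil : l.take n = [] := by simpa [List.isEmpty_iff] using hp
      have hall : ∀ c ∈ pvSeps, pvCuts l c n = [] :=
        fun c _ => pvCuts_nil_of_take_nil hnil
      rw [pvPick_none_of_all_nil hall]
      simp [hp]
    · simp only [hp, if_false]
      have hsp := pvSepPos_pick l n hn pvSeps (by simp [pvSeps])
      cases hpk : pvPick l n pvSeps with
      | none =>
        have hle := hsp.2 hpk
        rw [dif_neg (by omega)]
        rfl
      | some m =>
        have heq := hsp.1 m hpk
        have hm : 0 < m := pvPick_pos hpk
        have hmn : m < n := pvPick_lt hpk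
        have hlen : (l.take n).length = n := by simp [hn]
        rw [dif_pos (by rw [heq, hlen]; constructor <;> [exact_mod_cast hm; exact_mod_cast hmn])]
        have hslice : PySem.List.slice (l.take n) none (some (pvSepPos (l.take n) pvSeps)) = l.take m := by
          rw [heq, PySem.List.slice_to_natCast (l.take n) m, List.take_take]
          congr 1
          omega
        rw [hslice]
        by_cases hmem : String.mk (l.take m) ∈ allow
        · simp [hmem]
        · simp only [hmem, if_false]
          exact ih m hmn (by omega)

theorem pvB_eq_chain (allow : List String) (l : List Char) :
    ∀ n, n ≤ l.length → ∀ e s, e ++ s = pvSeps →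
      (∀ c ∈ e, pvCuts l c n = []) →
      pvBPhase allow l s (n : Int) = pvChain allow l n := by
  intro n
  induction n using Nat.strong_induction_on with
  | _ n ih =>
    intro hn e s
    induction s generalizing e with
    | nil =>
      intro heq hinv
      rw [List.append_nil] at heq
      rw [pvChain, pvPick_none_of_all_nil (fun c hc => hinv c (heq ▸ hc))]
      rfl
    | cons c r ihs =>
      intro heq hinv
      simp only [pvBPhase]
      rw [pvEnumCuts c hn]
      by_cases hc : pvCuts l c n = []
      · rw [hc]
        simp only [List.map_nil, List.reverse_nil]
        have htc : pvTryCuts allow l [] = false := rfl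
        rw [htc]
        simp only [Bool.false_eq_true, if_false]
        exact ihs (e ++ [c]) (by simpa using heq)
          (fun c' hc' => by
            rcases List.mem_append.mp hc' with h' | h'
            · exact hinv c' h'
            · simp at h'; subst h'; exact hc)
      · have hg := List.getLast?_eq_getLast hc
        set m := (pvCuts l c n).getLast hc with hmdef
        have hpick : pvPick l n pvSeps = some m := by
          rw [← heq, pvPick_append_of_nil hinv]
          simp only [pvPick]
          rw [hg]
        have hmn : m < n := pvPick_lt hpick
        have hmle : m ≤ l.length := by omega
        have hdL : pvCuts l c m = (pvCuts l c n).dropLast := pvCuts_dropLast hg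
        have hsplit : (pvCuts l c n).dropLast ++ [m] = pvCuts l c n :=
          List.dropLast_append_getLast hc
        have hchm : pvBPhase allow l (c :: r) ((m : Nat) : Int) = pvChain allow l m :=
          ih m hmn hmle e (c :: r) heq
            (fun c' h' => pvCuts_mono_nil (hinv c' h') hmn.le)
        simp only [pvBPhase] at hchm
        rw [pvEnumCuts c hmle, hdL] at hchm
        rw [pvChain]
        rw [hpick]
        rw [← List.map_reverse, pvTryCuts_any, List.any_reverse] at hchm ⊢
        cases hd : (pvCuts l c n).dropLast with
        | nil =>
          have hcuts : pvCuts l c n = [m] := by rw [← hsplit, hd]; rfl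
          rw [hd] at hchm
          rw [hcuts]
          simp only [List.any_nil, Bool.false_eq_true, if_false, List.map_nil] at hchm
          by_cases hmem : String.mk (l.take m) ∈ allow
          · simp [hmem]
          · simp only [List.any_cons, List.any_nil, List.map_cons, List.map_nil]
            simp [hmem, ← hchm]
        | cons q0 d' =>
          have hcuts : pvCuts l c n = q0 :: (d' ++ [m]) := by rw [← hsplit, hd]; rfl
          rw [hd] at hchm
          rw [hcuts]
          by_cases hmem : String.mk (l.take m) ∈ allow
          · simp only [if_pos hmem]
            have : (q0 :: (d' ++ [m])).any
                (fun j => decide (String.mk (l.take j) ∈ allow)) = true := by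
              simp only [List.any_cons, List.any_append, List.any_cons, List.any_nil]
              simp [hmem]
            simp [this]
          · simp only [if_neg hmem, ← hchm]
            have hmfalse : decide (String.mk (l.take m) ∈ allow) = false := by simp [hmem]
            simp only [List.any_cons, List.any_append, List.any_nil, hmfalse,
              List.map_cons, List.any_cons]
            cases h1 : decide (String.mk (l.take q0) ∈ allow) <;>
              cases h2 : d'.any (fun j => decide (String.mk (l.take j) ∈ allow)) <;> simp

-- ===== VERDICT (by name: the statement is the Claim_ definition above) =====
theorem is_url_allowed_spec : Claim_equal_is_url_allowed := by
  intro url allow _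
  unfold Spec_is_url_allowed is_url_allowed is_url_allowed_alt
  by_cases hmem : url ∈ allow
  · simp [hmem]
  · have hA := pvA_eq_chain allow url.toList url.toList.length le_rfl
    rw [List.take_length] at hA
    have hB := pvB_eq_chain allow url.toList url.toList.length le_rfl [] pvSeps rfl
      (by intro c hc; simp at hc)
    simp only [hmem, if_false]
    rw [hA, hB]
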